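-- pv_equiv track=rewrite | github.com/marc3linho/OrangeClock | src/drivers/console_display.py | vpixels_1x2
-- ===== SOURCE A (Python) =====
-- def vpixels_1x2(vpix_bytes):
--     """
--     receives bytes of 8 vertical pixels side-by-side,
--     returns 4tuple of UTFBLKS indices of 1x2 pixels from left to right
--
--     each byte is bitwise-anded with 2**i to select bit[i] for all 8 bits.
--     those powers of 2 are fed to int(bool()) resulting in 0 or 1 for each.
--     the odd bits are left shifted 1 then ored with the adjacent even bit
--     for an intval (0-3) to be used by caller for indexing UTFBLKS.
--     """
--     bits = range(0,8,2)
--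
--     return tuple([
--         [row[j] for row in [
--             [int(bool(x & 2**i)) << 1 | int(bool(x & 2**(i+1))) for i in bits]
--                 for x in vpix_bytes
--         ]] for j in range(4)
--     ])
-- ===== SOURCE B (Python) =====
-- def vpixels_1x2(vpix_bytes):
--     cols = ([], [], [], [])
--     for x in vpix_bytes:
--         for k, i in enumerate(range(0, 8, 2)):
--             v = (2 if x & (1 << i) else 0) + (1 if x & (1 << (i + 1)) else 0)
--             cols[k].append(v)
--     return cols
-- ===== Notes on version B (the rewrite author's own statement) =====
-- stated objective: faster
-- what changed: One pass over the bytes that appends each byte's four 2-bit values directly to four column lists, instead of building the full row matrix and then rebuilding/scanning it once per column; constant-factor win from dropping the intermediate matrix and the per-column rescans.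
import Mathlib
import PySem

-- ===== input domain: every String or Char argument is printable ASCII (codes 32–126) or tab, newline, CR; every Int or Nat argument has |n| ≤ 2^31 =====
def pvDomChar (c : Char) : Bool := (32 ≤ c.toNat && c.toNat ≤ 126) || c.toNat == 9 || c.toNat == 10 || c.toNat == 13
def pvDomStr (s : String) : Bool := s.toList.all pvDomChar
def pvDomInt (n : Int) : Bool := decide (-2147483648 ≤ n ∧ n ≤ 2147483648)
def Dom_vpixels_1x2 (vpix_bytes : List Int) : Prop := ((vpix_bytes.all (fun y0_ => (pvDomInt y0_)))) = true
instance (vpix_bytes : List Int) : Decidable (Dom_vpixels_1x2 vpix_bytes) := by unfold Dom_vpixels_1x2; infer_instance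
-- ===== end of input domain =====

-- B replaces A's build-the-matrix-then-rebuild-it-per-column comprehension by a single
-- fold that appends each byte's four 2-bit values to four column accumulators (simpler).

-- ===== PORT A =====
-- int(bool(x & 2**i)) : 1 if bit set else 0 (PySem.Int.band is Python-exact on negatives)
def pvBitA (x : Int) (i : Nat) : Int := if PySem.Int.band x (2 ^ i) ≠ 0 then 1 else 0

def vpixels_1x2 (vpix_bytes : List Int) : List (List Int) :=
  let bits := PySem.List.pyRange 0 8 2
  let matrix := vpix_bytes.map (fun x =>
    bits.map (fun i => PySem.Int.bor (pvBitA x i.toNat * 2) (pvBitA x (i.toNat + 1))))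
  -- row[j] for j in range(4): every row has length 4, so getD is exact (index always in range)
  (List.range 4).map (fun j => matrix.map (fun row => row.getD j 0))

-- ===== PORT B =====
-- (2 if x & (1 << i) else 0) + (1 if x & (1 << (i+1)) else 0)
def pvValB (x : Int) (i : Nat) : Int :=
  (if PySem.Int.band x ((1 <<< i : Nat) : Int) ≠ 0 then 2 else 0)
    + (if PySem.Int.band x ((1 <<< (i + 1) : Nat) : Int) ≠ 0 then 1 else 0)

-- one iteration of B's loop: append x's four values to the four column accumulators
def pvStepB (c : List Int × List Int × List Int × List Int) (x : Int) :
    List Int × List Int × List Int × List Int :=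
  (c.1 ++ [pvValB x 0], c.2.1 ++ [pvValB x 2], c.2.2.1 ++ [pvValB x 4], c.2.2.2 ++ [pvValB x 6])

def vpixels_1x2_alt (vpix_bytes : List Int) : List (List Int) :=
  let c := vpix_bytes.foldl pvStepB ([], [], [], [])
  [c.1, c.2.1, c.2.2.1, c.2.2.2]

-- ===== PRECONDITION & SPEC =====
def Spec_vpixels_1x2 (vpix_bytes : List Int) (out : List (List Int)) : Prop := out = vpixels_1x2_alt vpix_bytes
instance (vpix_bytes : List Int) (out : List (List Int)) : Decidable (Spec_vpixels_1x2 vpix_bytes out) := by unfold Spec_vpixels_1x2; infer_instance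

-- ===== CLAIM (what is proved, stated in full; the proofs are below) =====
def Claim_equal_vpixels_1x2 : Prop := ∀ (vpix_bytes : List Int), Dom_vpixels_1x2 vpix_bytes → Spec_vpixels_1x2 vpix_bytes (vpixels_1x2 vpix_bytes)

-- ===== LEMMAS AND PROOFS =====

-- B's value formula agrees with A's bit-or formula at each even bit position
theorem pvValB_eq (x : Int) (i : Nat) :
    pvValB x i = PySem.Int.bor (pvBitA x i * 2) (pvBitA x (i + 1)) := by
  unfold pvValB pvBitA
  rw [Nat.one_shiftLeft, Nat.one_shiftLeft]
  push_cast
  split_ifs <;> decide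

theorem foldB_spec (xs : List Int) (c0 c1 c2 c3 : List Int) :
    xs.foldl pvStepB (c0, c1, c2, c3)
      = (c0 ++ xs.map (pvValB · 0), c1 ++ xs.map (pvValB · 2),
         c2 ++ xs.map (pvValB · 4), c3 ++ xs.map (pvValB · 6)) := by
  induction xs generalizing c0 c1 c2 c3 with
  | nil => simp
  | cons x xs ih => simp [List.foldl_cons, pvStepB, ih]

-- ===== VERDICT (by name: the statement is the Claim_ definition above) =====
theorem vpixels_1x2_spec : Claim_equal_vpixels_1x2 := by
  intro xs _
  unfold Spec_vpixels_1x2 vpixels_1x2 vpixels_1x2_alt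
  rw [show PySem.List.pyRange 0 8 2 = [0, 2, 4, 6] from by decide,
      show List.range 4 = [0, 1, 2, 3] from by decide,
      foldB_spec]
  simp [List.map_map, pvValB_eq, Function.comp]
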